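-- pv_equiv track=rewrite | github.com/SinySs/LRU-K | tests/lru-3/lru-3 tests.py | find_lru
-- ===== SOURCE A (Python) =====
-- def find_lru(cache):
--     min_value = cache[0][1][0]
--     index = 0
--     for i in range(len(cache)):
--         if cache[i][1][0] <= min_value:
--             min_value = cache[i][1][0]
--             index = i
--     return index
-- ===== SOURCE B (Python) =====
-- def find_lru(cache):
--     m = min(row[1][0] for row in cache)
--     return max(i for i, row in enumerate(cache) if row[1][0] == m)
-- ===== Notes on version B (the rewrite author's own statement) =====
-- stated objective: simpler
-- what changed: Replaces the single index-and-value co-tracking loop by two value-level passes: first compute the minimum key with min(), then return the largest index holding that key with max() over enumerate; no mutable state is threaded.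
import Mathlib
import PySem

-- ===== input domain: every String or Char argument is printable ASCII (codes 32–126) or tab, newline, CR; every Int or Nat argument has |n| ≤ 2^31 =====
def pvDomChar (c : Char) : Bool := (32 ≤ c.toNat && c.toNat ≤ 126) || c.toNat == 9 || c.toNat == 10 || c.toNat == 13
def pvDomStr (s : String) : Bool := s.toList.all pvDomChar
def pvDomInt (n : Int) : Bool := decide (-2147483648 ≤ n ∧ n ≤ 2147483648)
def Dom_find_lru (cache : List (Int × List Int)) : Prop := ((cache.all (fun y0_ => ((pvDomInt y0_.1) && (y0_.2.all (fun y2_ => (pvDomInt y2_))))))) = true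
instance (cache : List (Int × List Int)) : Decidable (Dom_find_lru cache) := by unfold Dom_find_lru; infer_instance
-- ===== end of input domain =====

-- B replaces A's index-and-value co-tracking loop by two passes (min of the keys, then the
-- largest index holding that minimum); objective: simpler.

-- ===== PORT A =====
-- transliteration of A; cache[0][1][0] and cache[i][1][0] via pyGetD (in range on Pre_)
def find_lru (cache : List (Int × List Int)) : Int :=
  let min_value : Int := PySem.List.pyGetD (PySem.List.pyGetD cache 0 (0, [])).2 0 0
  let s := (PySem.List.pyRange 0 cache.length 1).foldl
    (fun (s : Int × Int) i =>
      let v := PySem.List.pyGetD (PySem.List.pyGetD cache i (0, [])).2 0 0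
      if v ≤ s.1 then (v, i) else s)
    (min_value, 0)
  s.2

-- ===== PORT B =====
def find_lru_alt (cache : List (Int × List Int)) : Int :=
  let keys := cache.map (fun row => PySem.List.pyGetD row.2 0 0)
  let m := (PySem.List.min? keys (fun x => x)).getD 0
  let idxs := ((PySem.List.enumerate cache 0).filter
      (fun p => PySem.List.pyGetD p.2.2 0 0 == m)).map (fun p => p.1)
  (PySem.List.max? idxs (fun x => x)).getD 0

-- ===== PRECONDITION & SPEC =====
-- Pre_ excludes exactly the inputs where Python A raises IndexError: an empty cache, or a
-- row whose timestamp list is empty.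
def Pre_find_lru (cache : List (Int × List Int)) : Prop :=
  cache ≠ [] ∧ ∀ r ∈ cache, r.2 ≠ []
instance (cache : List (Int × List Int)) : Decidable (Pre_find_lru cache) := by
  unfold Pre_find_lru; infer_instance
def pvWitness_find_lru : (List (Int × List Int)) := [(1, [5]), (2, [3])]
def Spec_find_lru (cache : List (Int × List Int)) (out : Int) : Prop := out = find_lru_alt cache
instance (cache : List (Int × List Int)) (out : Int) : Decidable (Spec_find_lru cache out) := by unfold Spec_find_lru; infer_instance

-- ===== CLAIM (what is proved, stated in full; the proofs are below) =====
def Claim_equal_find_lru : Prop := ∀ (cache : List (Int × List Int)), Dom_find_lru cache → Pre_find_lru cache → Spec_find_lru cache (find_lru cache)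

-- ===== LEMMAS AND PROOFS =====

-- the key of a row: row[1][0] (total via the in-range default, as in the ports)
def kfun (r : Int × List Int) : Int := PySem.List.pyGetD r.2 0 0

-- A's loop body, on (index, value) pairs
def stepA (s : Int × Int) (p : Int × Int) : Int × Int :=
  if p.2 ≤ s.1 then (p.2, p.1) else s

-- A's whole loop, expressed over the enumerated key list
def runA (keys : List Int) : Int × Int :=
  (PySem.List.enumerate keys 0).foldl stepA (keys.headD 0, 0)

lemma enumerate_map_pv {α β : Type} (f : α → β) :
    ∀ (xs : List α) (s : Int),
      PySem.List.enumerate (xs.map f) s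
        = (PySem.List.enumerate xs s).map (fun p => (p.1, f p.2)) := by
  intro xs
  induction xs with
  | nil => intro s; simp [PySem.List.enumerate_nil]
  | cons x t ih => intro s; simp [PySem.List.enumerate_cons, ih]

-- invariant of A's loop: result = (minimum of the keys, last index carrying it)
lemma runA_inv (x : Int) (t : List Int) :
    (runA (x :: t)).1 = t.foldl min x
    ∧ ((runA (x :: t)).2, (runA (x :: t)).1) ∈ PySem.List.enumerate (x :: t) 0
    ∧ ∀ p ∈ PySem.List.enumerate (x :: t) 0, p.2 = (runA (x :: t)).1 → p.1 ≤ (runA (x :: t)).2 := by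
  induction t using List.reverseRecOn with
  | nil =>
    simp [runA, PySem.List.enumerate_cons, PySem.List.enumerate_nil, stepA]
  | append_singleton t' v ih =>
    have hl : (x :: (t' ++ [v])) = (x :: t') ++ [v] := by simp
    rw [hl]
    have henum : PySem.List.enumerate ((x :: t') ++ [v]) 0
        = PySem.List.enumerate (x :: t') 0 ++ [(((x :: t').length : Int), v)] := by
      rw [PySem.List.enumerate_append]
      simp [PySem.List.enumerate_cons, PySem.List.enumerate_nil]
    have hhead : ((x :: t') ++ [v]).headD 0 = (x :: t').headD 0 := by simp
    have hrun : runA ((x :: t') ++ [v])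
        = stepA (runA (x :: t')) (((x :: t').length : Int), v) := by
      unfold runA
      rw [henum, hhead, List.foldl_append]
      simp
    obtain ⟨ih1, ih2, ih3⟩ := ih
    have hmemlt : ∀ p ∈ PySem.List.enumerate (x :: t') 0, p.1 < ((x :: t').length : Int) := by
      intro p hp
      rcases (PySem.List.mem_enumerate_iff _ _ _).1 hp with ⟨kk, hk, rfl⟩
      simp only [zero_add]
      exact_mod_cast hk
    by_cases hv : v ≤ (runA (x :: t')).1
    · -- new minimum (or tie): state becomes (v, last index)
      have hstep : runA ((x :: t') ++ [v]) = (v, ((x :: t').length : Int)) := by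
        rw [hrun]; simp [stepA, hv]
      refine ⟨?_, ?_, ?_⟩
      · rw [hstep]; simp only [List.foldl_append, List.foldl_cons, List.foldl_nil]
        rw [← ih1, min_eq_right hv]
      · rw [hstep, henum]; simp
      · intro p hp _
        rw [henum] at hp
        rw [hstep]
        rcases List.mem_append.1 hp with h | h
        · exact le_of_lt (hmemlt p h)
        · simp only [List.mem_singleton] at h; subst h; simp
    · -- v is strictly larger: state unchanged
      have hstep : runA ((x :: t') ++ [v]) = runA (x :: t') := by
        rw [hrun]; simp [stepA, hv]
      refine ⟨?_, ?_, ?_⟩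
      · rw [hstep]; simp only [List.foldl_append, List.foldl_cons, List.foldl_nil]
        rw [← ih1, min_eq_left (le_of_lt (lt_of_not_ge hv))]
      · rw [hstep, henum]; exact List.mem_append.2 (Or.inl ih2)
      · intro p hp hpv
        rw [hstep] at hpv ⊢
        rw [henum] at hp
        rcases List.mem_append.1 hp with h | h
        · exact ih3 p h hpv
        · simp only [List.mem_singleton] at h; subst h
          simp only at hpv; omega

-- A's port equals runA on the key list (nonempty cache)
lemma find_lru_eq_runA (r : Int × List Int) (rs : List (Int × List Int)) :
    find_lru (r :: rs) = (runA ((r :: rs).map kfun)).2 := by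
  have hget : ∀ i : Int, PySem.List.pyGetD ((r :: rs).map kfun) i 0
      = PySem.List.pyGetD (PySem.List.pyGetD (r :: rs) i (0, [])).2 0 0 := by
    intro i
    have h := PySem.List.pyGetD_map kfun (r :: rs) i (0, [])
    simpa [kfun, PySem.List.pyGetD] using h
  simp only [find_lru, runA]
  rw [PySem.List.enumerate_eq_map_pyRange ((r :: rs).map kfun) (0 : Int), List.foldl_map]
  simp only [stepA, hget, PySem.List.len_eq, List.length_map]
  have hinit : ((r :: rs).map kfun).headD 0
      = PySem.List.pyGetD (PySem.List.pyGetD (r :: rs) 0 (0, [])).2 0 0 := by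
    simp [kfun, PySem.List.pyGetD_zero_cons]
  rw [hinit]

-- B's port equals runA's index too
lemma find_lru_alt_eq (r : Int × List Int) (rs : List (Int × List Int)) :
    find_lru_alt (r :: rs) = (runA ((r :: rs).map kfun)).2 := by
  have hkeys : (r :: rs).map kfun = kfun r :: rs.map kfun := by simp
  obtain ⟨hmin, hmem, hlast⟩ := runA_inv (kfun r) (rs.map kfun)
  rw [← hkeys] at hmin hmem hlast
  simp only [find_lru_alt]
  have hfk : (fun row : Int × List Int => PySem.List.pyGetD row.2 0 0) = kfun := rfl
  rw [hfk]
  -- B's m is A's running minimum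
  have hm : (PySem.List.min? ((r :: rs).map kfun) (fun x => x)).getD 0
      = (runA ((r :: rs).map kfun)).1 := by
    rw [hkeys, PySem.List.min?_id_cons]
    rw [hkeys] at hmin
    simp [hmin]
  rw [hm]
  -- B's candidate index list, rewritten over the enumerated keys
  have hidxs :
      ((PySem.List.enumerate (r :: rs) 0).filter
          (fun p => PySem.List.pyGetD p.2.2 0 0 == (runA ((r :: rs).map kfun)).1)).map (fun p => p.1)
      = ((PySem.List.enumerate ((r :: rs).map kfun) 0).filter
          (fun p => p.2 == (runA ((r :: rs).map kfun)).1)).map (fun p => p.1) := by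
    rw [enumerate_map_pv kfun (r :: rs) 0, List.filter_map, List.map_map]
    rfl
  rw [hidxs]
  set keys := (r :: rs).map kfun with hk
  set idxs := ((PySem.List.enumerate keys 0).filter (fun p => p.2 == (runA keys).1)).map (fun p => p.1) with hi
  have hjmem : (runA keys).2 ∈ idxs := by
    rw [hi]
    refine List.mem_map.2 ⟨((runA keys).2, (runA keys).1), ?_, rfl⟩
    exact List.mem_filter.2 ⟨hmem, by simp⟩
  have hjmax : ∀ j ∈ idxs, j ≤ (runA keys).2 := by
    intro j hj
    rw [hi] at hj
    rcases List.mem_map.1 hj with ⟨p, hp, rfl⟩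
    rcases List.mem_filter.1 hp with ⟨hpe, hpv⟩
    exact hlast p hpe (by simpa using hpv)
  rcases ho : PySem.List.max? idxs (fun x => x) with _ | y
  · exact absurd (PySem.List.max?_eq_none_iff idxs (fun x => x) |>.1 ho ▸ hjmem) (List.not_mem_nil)
  · have hy1 : y ∈ idxs := PySem.List.max?_mem ho
    have hy2 : (runA keys).2 ≤ y := PySem.List.max?_isMax ho _ hjmem
    have : y = (runA keys).2 := le_antisymm (hjmax y hy1) hy2
    simp [this]

-- ===== VERDICT (by name: the statement is the Claim_ definition above) =====
theorem find_lru_spec : Claim_equal_find_lru := by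
  intro cache _ hpre
  unfold Spec_find_lru
  match cache, hpre with
  | r :: rs, _ => rw [find_lru_eq_runA, find_lru_alt_eq]
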